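-- pv_equiv track=rewrite | github.com/vdumchiviy/just_interesting_tasks | codesignal_com/codesignal_com006.py | solution
-- ===== SOURCE A (Python) =====
-- def solution(matrix):
--     # template = [0 if x == 0 else 1 for x in matrix[0]]
--     template = [1 for x in matrix[0]]
--     result = 0
--     for y in range(len(matrix)):
--         for x in range(len(matrix[y])):
--             if matrix[y][x] == 0:
--                 if template[x] != 0:
--                     template[x] = 0
--             else:
--                 if template[x] != 0:
--                     result += matrix[y][x]
--     return result
-- ===== SOURCE B (Python) =====
-- def solution(matrix):
--     width = len(matrix[0])
--     total = 0
--     for c in range(width):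
--         for row in matrix:
--             if c < len(row):
--                 v = row[c]
--                 if v == 0:
--                     break
--                 total += v
--     return total
-- ===== Notes on version B (the rewrite author's own statement) =====
-- stated objective: simpler
-- what changed: B iterates column-by-column, summing each column top-to-bottom and breaking at the first zero, which removes A's maintained per-column alive-flag array.
import Mathlib
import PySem

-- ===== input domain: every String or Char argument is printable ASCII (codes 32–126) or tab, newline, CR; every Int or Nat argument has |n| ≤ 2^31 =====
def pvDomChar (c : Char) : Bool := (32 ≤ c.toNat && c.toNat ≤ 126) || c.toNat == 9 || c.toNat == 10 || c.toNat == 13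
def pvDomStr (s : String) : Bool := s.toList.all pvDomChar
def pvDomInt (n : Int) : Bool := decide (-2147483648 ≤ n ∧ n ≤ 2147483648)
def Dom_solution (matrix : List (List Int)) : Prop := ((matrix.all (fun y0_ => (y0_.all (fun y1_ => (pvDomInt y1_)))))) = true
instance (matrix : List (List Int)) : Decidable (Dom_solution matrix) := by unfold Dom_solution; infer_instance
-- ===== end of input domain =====

-- B replaces A's per-column alive-flag array by a column-by-column walk that breaks at the first zero (simpler; same cost).

-- ===== PORT A =====
-- inner loop body: 'for x in range(len(row))'; row.getD x 0 and template reads via getD are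
-- exact for the indices actually reached inside Pre_solution (x < len(row) ≤ len(template));
-- outside Pre_ Python A raises IndexError on template[x].
def pvInnerStep (row : List Int) (st : List Int × Int) (x : Nat) : List Int × Int :=
  if row.getD x 0 = 0 then
    (if st.1.getD x 0 ≠ 0 then (st.1.set x 0, st.2) else st)
  else
    (if st.1.getD x 0 ≠ 0 then (st.1, st.2 + row.getD x 0) else st)

def pvRowStep (st : List Int × Int) (row : List Int) : List Int × Int :=
  (List.range row.length).foldl (pvInnerStep row) st

def solution (matrix : List (List Int)) : Int :=
  -- matrix.headI plays matrix[0] (Python raises IndexError on [], which Pre_ excludes)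
  let template : List Int := matrix.headI.map (fun _ => 1)
  (matrix.foldl pvRowStep (template, 0)).2

-- ===== PORT B =====
-- the inner 'for row in matrix: … break' loop of Source B, one column at a time
def colSum : List (List Int) → Nat → Int
  | [], _ => 0
  | row :: rest, c =>
    if c < row.length then
      (if row.getD c 0 = 0 then 0 else row.getD c 0 + colSum rest c)
    else colSum rest c

def solution_alt (matrix : List (List Int)) : Int :=
  (List.range matrix.headI.length).foldl (fun total c => total + colSum matrix c) 0

-- ===== PRECONDITION & SPEC =====
-- Pre_ excludes exactly the inputs where Python A raises IndexError: the empty matrix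
-- (matrix[0]) and matrices with a row longer than the first row (template[x]).
def Pre_solution (matrix : List (List Int)) : Prop :=
  matrix ≠ [] ∧ ∀ row ∈ matrix, row.length ≤ matrix.headI.length
instance (matrix : List (List Int)) : Decidable (Pre_solution matrix) := by
  unfold Pre_solution; infer_instance

def pvWitness_solution : List (List Int) := [[1, 2], [0, 3]]

def Spec_solution (matrix : List (List Int)) (out : Int) : Prop := out = solution_alt matrix
instance (matrix : List (List Int)) (out : Int) : Decidable (Spec_solution matrix out) := by unfold Spec_solution; infer_instance

-- ===== CLAIM (what is proved, stated in full; the proofs are below) =====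
def Claim_equal_solution : Prop := ∀ (matrix : List (List Int)), Dom_solution matrix → Pre_solution matrix → Spec_solution matrix (solution matrix)

-- ===== LEMMAS AND PROOFS =====

lemma getD_ne_lt {l : List Int} {c : Nat} (h : l.getD c 0 ≠ 0) : c < l.length := by
  by_contra hc
  exact h (List.getD_eq_default _ _ (Nat.le_of_not_lt hc))

lemma if_cond_succ {c n : Nat} (hcn : c ≠ n) (P : Prop) [Decidable P] (z w : Int) :
    (if c < n + 1 ∧ P then z else w) = (if c < n ∧ P then z else w) :=
  if_congr (and_congr_left' (by omega)) rfl rfl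

lemma step_if (n c : Nat) (P : Prop) [Decidable P] (v : Int) (hv : c = n → P → v = 0) :
    (if c < n ∧ P then (0:Int) else v) = if c < n + 1 ∧ P then 0 else v := by
  by_cases hP : P
  · by_cases hc : c < n
    · rw [if_pos ⟨hc, hP⟩, if_pos ⟨Nat.lt_succ_of_lt hc, hP⟩]
    · by_cases hceq : c = n
      · rw [if_neg (fun h => hc h.1), if_pos ⟨by omega, hP⟩, hv hceq hP]
      · rw [if_neg (fun h => hc h.1), if_neg (fun h => absurd h.1 (by omega))]
  · rw [if_neg (fun h => hP h.2), if_neg (fun h => hP h.2)]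

lemma pvRow_fst (row t : List Int) (r : Int) (n : Nat) :
    ((List.range n).foldl (pvInnerStep row) (t, r)).1.length = t.length ∧
    ∀ c, ((List.range n).foldl (pvInnerStep row) (t, r)).1.getD c 0
      = if c < n ∧ row.getD c 0 = 0 then 0 else t.getD c 0 := by
  induction n with
  | zero =>
    refine ⟨rfl, fun c => ?_⟩
    rw [if_neg (fun h => Nat.not_lt_zero c h.1)]
    rfl
  | succ n ih =>
    rw [List.range_succ, List.foldl_append]
    set st := (List.range n).foldl (pvInnerStep row) (t, r) with hst
    obtain ⟨hlen, hget⟩ := ih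
    have hn : st.1.getD n 0 = t.getD n 0 := by
      rw [hget n, if_neg (fun h => lt_irrefl n h.1)]
    simp only [List.foldl_cons, List.foldl_nil, pvInnerStep]
    by_cases hr : row.getD n 0 = 0
    · rw [if_pos hr]
      by_cases ha : t.getD n 0 = 0
      · rw [if_neg (show ¬ st.1.getD n 0 ≠ 0 from by rw [hn]; exact fun h => h ha)]
        refine ⟨hlen, fun c => ?_⟩
        rw [hget c]
        exact step_if n c _ _ (fun hc _ => by subst hc; exact ha)
      · rw [if_pos (show st.1.getD n 0 ≠ 0 from by rw [hn]; exact ha)]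
        have hnlen : n < st.1.length := getD_ne_lt (show st.1.getD n 0 ≠ 0 from by rw [hn]; exact ha)
        refine ⟨by rw [List.length_set, hlen], fun c => ?_⟩
        rcases eq_or_ne c n with rfl | hcn
        · rw [List.getD_eq_getElem?_getD, List.getElem?_set_self hnlen,
            if_pos ⟨Nat.lt_succ_self c, hr⟩]
          rfl
        · rw [List.getD_eq_getElem?_getD, List.getElem?_set_ne (Ne.symm hcn),
            ← List.getD_eq_getElem?_getD, hget c, if_cond_succ hcn]
    · rw [if_neg hr]
      have h1 : (if st.1.getD n 0 ≠ 0 then (st.1, st.2 + row.getD n 0) else st).1 = st.1 := by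
        split_ifs <;> rfl
      rw [h1]
      refine ⟨hlen, fun c => ?_⟩
      rw [hget c]
      exact step_if n c _ _ (fun hc hp => absurd (hc ▸ hp) hr)

lemma pvRow_snd (row t : List Int) (r : Int) (n : Nat) :
    ((List.range n).foldl (pvInnerStep row) (t, r)).2
      = r + ∑ x ∈ Finset.range n,
          (if t.getD x 0 ≠ 0 ∧ row.getD x 0 ≠ 0 then row.getD x 0 else 0) := by
  induction n with
  | zero => simp
  | succ n ih =>
    rw [List.range_succ, List.foldl_append, Finset.sum_range_succ]
    set st := (List.range n).foldl (pvInnerStep row) (t, r) with hst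
    have hn : st.1.getD n 0 = t.getD n 0 := by
      rw [(pvRow_fst row t r n).2 n, if_neg (fun h => lt_irrefl n h.1)]
    simp only [List.foldl_cons, List.foldl_nil, pvInnerStep]
    by_cases hr : row.getD n 0 = 0
    · rw [if_pos hr]
      have h2 : (if st.1.getD n 0 ≠ 0 then (st.1.set n 0, st.2) else st).2 = st.2 := by
        split_ifs <;> rfl
      rw [h2, if_neg (show ¬ (t.getD n 0 ≠ 0 ∧ row.getD n 0 ≠ 0) from fun h => h.2 hr),
        add_zero, ih]
    · rw [if_neg hr]
      by_cases ha : t.getD n 0 = 0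
      · rw [if_neg (show ¬ st.1.getD n 0 ≠ 0 from by rw [hn]; exact fun h => h ha),
          if_neg (show ¬ (t.getD n 0 ≠ 0 ∧ row.getD n 0 ≠ 0) from fun h => h.1 ha),
          add_zero, ih]
      · rw [if_pos (show st.1.getD n 0 ≠ 0 from by rw [hn]; exact ha),
          if_pos (show t.getD n 0 ≠ 0 ∧ row.getD n 0 ≠ 0 from ⟨ha, hr⟩)]
        show st.2 + row.getD n 0 = _
        rw [ih, add_assoc]

lemma sum_range_eq_min (f : Nat → Int) (m n : Nat)
    (h : ∀ x, f x ≠ 0 → x < m ∧ x < n) :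
    ∑ x ∈ Finset.range m, f x = ∑ x ∈ Finset.range n, f x := by
  have sub1 : Finset.range (min m n) ⊆ Finset.range m := fun x hx =>
    Finset.mem_range.2 (lt_of_lt_of_le (Finset.mem_range.1 hx) (Nat.min_le_left m n))
  have sub2 : Finset.range (min m n) ⊆ Finset.range n := fun x hx =>
    Finset.mem_range.2 (lt_of_lt_of_le (Finset.mem_range.1 hx) (Nat.min_le_right m n))
  have h1 : ∑ x ∈ Finset.range m, f x = ∑ x ∈ Finset.range (min m n), f x := by
    refine (Finset.sum_subset sub1 ?_).symm
    intro x hx hnx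
    by_contra hf
    have := h x hf
    simp only [Finset.mem_range] at hx hnx
    omega
  have h2 : ∑ x ∈ Finset.range n, f x = ∑ x ∈ Finset.range (min m n), f x := by
    refine (Finset.sum_subset sub2 ?_).symm
    intro x hx hnx
    by_contra hf
    have := h x hf
    simp only [Finset.mem_range] at hx hnx
    omega
  rw [h1, h2]

lemma pvFold_char (m : List (List Int)) (t : List Int) (r : Int) :
    (m.foldl pvRowStep (t, r)).2
      = r + ∑ c ∈ Finset.range t.length,
          (if t.getD c 0 ≠ 0 then colSum m c else 0) := by
  induction m generalizing t r with
  | nil => simp [colSum]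
  | cons row rest ih =>
    simp only [List.foldl_cons]
    have hstep : pvRowStep (t, r) row
        = ((List.range row.length).foldl (pvInnerStep row) (t, r)) := rfl
    rw [hstep]
    set st := (List.range row.length).foldl (pvInnerStep row) (t, r) with hst
    have hpair : st = (st.1, st.2) := rfl
    rw [hpair, ih st.1 st.2]
    obtain ⟨hlen, hget⟩ := pvRow_fst row t r row.length
    rw [hlen, pvRow_snd row t r row.length]
    have hshift : ∑ x ∈ Finset.range row.length,
          (if t.getD x 0 ≠ 0 ∧ row.getD x 0 ≠ 0 then row.getD x 0 else 0)
        = ∑ x ∈ Finset.range t.length,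
          (if t.getD x 0 ≠ 0 ∧ row.getD x 0 ≠ 0 then row.getD x 0 else 0) := by
      apply sum_range_eq_min
      intro x hf
      by_cases hP : t.getD x 0 ≠ 0 ∧ row.getD x 0 ≠ 0
      · exact ⟨getD_ne_lt hP.2, getD_ne_lt hP.1⟩
      · rw [if_neg hP] at hf
        exact absurd rfl hf
    rw [hshift, add_assoc, ← Finset.sum_add_distrib]
    congr 1
    apply Finset.sum_congr rfl
    intro c _
    rw [hget c]
    simp only [colSum]
    by_cases ha : t.getD c 0 = 0
    · rw [if_neg (show ¬ (t.getD c 0 ≠ 0 ∧ row.getD c 0 ≠ 0) from fun h => h.1 ha),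
        if_neg (show ¬ (if c < row.length ∧ row.getD c 0 = 0 then (0:Int) else t.getD c 0) ≠ 0 from
          fun h => h (by split_ifs with hc; exacts [rfl, ha])),
        if_neg (show ¬ t.getD c 0 ≠ 0 from fun h => h ha), add_zero]
    · have ha' : t.getD c 0 ≠ 0 := ha
      by_cases hb : c < row.length
      · by_cases hz : row.getD c 0 = 0
        · rw [if_pos (show c < row.length ∧ row.getD c 0 = 0 from ⟨hb, hz⟩),
            if_neg (show ¬ (t.getD c 0 ≠ 0 ∧ row.getD c 0 ≠ 0) from fun h => h.2 hz),
            if_neg (show ¬ (0:Int) ≠ 0 from fun h => h rfl),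
            if_pos ha', if_pos hb, if_pos hz, add_zero]
        · rw [if_neg (show ¬ (c < row.length ∧ row.getD c 0 = 0) from fun h => hz h.2),
            if_pos (show t.getD c 0 ≠ 0 ∧ row.getD c 0 ≠ 0 from ⟨ha', hz⟩),
            if_pos ha', if_pos ha', if_pos hb, if_neg hz, add_comm]
      · have hz : row.getD c 0 = 0 := List.getD_eq_default _ _ (Nat.le_of_not_lt hb)
        rw [if_neg (show ¬ (c < row.length ∧ row.getD c 0 = 0) from fun h => hb h.1),
          if_neg (show ¬ (t.getD c 0 ≠ 0 ∧ row.getD c 0 ≠ 0) from fun h => h.2 hz),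
          if_pos ha', if_pos ha', if_neg hb, zero_add]

lemma foldl_add_sum (f : Nat → Int) (n : Nat) :
    (List.range n).foldl (fun total c => total + f c) 0
      = ∑ c ∈ Finset.range n, f c := by
  suffices h : ∀ (init : Int), (List.range n).foldl (fun total c => total + f c) init
      = init + ∑ c ∈ Finset.range n, f c by simpa using h 0
  induction n with
  | zero => simp
  | succ n ih =>
    intro init
    rw [List.range_succ, List.foldl_append, Finset.sum_range_succ]
    simp only [List.foldl_cons, List.foldl_nil, ih]
    ring

-- ===== VERDICT (by name: the statement is the Claim_ definition above) =====
theorem solution_spec : Claim_equal_solution := by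
  intro matrix _ _
  show solution matrix = solution_alt matrix
  unfold solution solution_alt
  rw [pvFold_char, foldl_add_sum]
  simp only [List.length_map, zero_add]
  apply Finset.sum_congr rfl
  intro c hc
  rw [Finset.mem_range] at hc
  have h1 : (matrix.headI.map (fun _ => (1 : Int))).getD c 0 = 1 := by
    rw [List.getD_eq_getElem _ _ (by simpa using hc)]
    simp
  rw [h1, if_pos (by norm_num)]
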